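-- pv_equiv track=rewrite | github.com/bdmckean/transcript_extraction_dev | src/transcribe.py | chunk_text_by_lines
-- ===== SOURCE A (Python) =====
-- def chunk_text_by_lines(text: str, lines_per_chunk: int = 10) -> list[str]:
--     """
--     Split text into chunks of approximately N lines each.
--
--     Args:
--         text: Text with line breaks
--         lines_per_chunk: Number of lines per chunk (default: 10)
--
--     Returns:
--         List of text chunks
--     """
--     lines = text.split("\n")
--     chunks = []
--
--     for i in range(0, len(lines), lines_per_chunk):
--         chunk = "\n".join(lines[i : i + lines_per_chunk])
--         if chunk.strip():  # Only add non-empty chunks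
--             chunks.append(chunk)
--
--     return chunks
-- ===== SOURCE B (Python) =====
-- def chunk_text_by_lines(text: str, lines_per_chunk: int = 10) -> list[str]:
--     """Single streaming pass: push lines into a buffer, flush every time it fills."""
--     chunks = []
--     buf = []
--     for line in text.split("\n"):
--         buf.append(line)
--         if len(buf) >= lines_per_chunk:
--             chunk = "\n".join(buf)
--             if chunk.strip():
--                 chunks.append(chunk)
--             buf = []
--     if buf:
--         chunk = "\n".join(buf)
--         if chunk.strip():
--             chunks.append(chunk)
--     return chunks
-- ===== Notes on version B (the rewrite author's own statement) =====
-- stated objective: alternative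
-- what changed: Replaces the range/slice indexing (split, then slice lines[i:i+N] for each range index) by a single streaming pass that pushes each line into a running buffer and flushes it (join + non-blank filter) whenever it fills, with one final flush for the partial tail.
-- outside the precondition, e.g. on chunk_text_by_lines('a\nb', -1): A returns [], B returns ['a', 'b']
import Mathlib
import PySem

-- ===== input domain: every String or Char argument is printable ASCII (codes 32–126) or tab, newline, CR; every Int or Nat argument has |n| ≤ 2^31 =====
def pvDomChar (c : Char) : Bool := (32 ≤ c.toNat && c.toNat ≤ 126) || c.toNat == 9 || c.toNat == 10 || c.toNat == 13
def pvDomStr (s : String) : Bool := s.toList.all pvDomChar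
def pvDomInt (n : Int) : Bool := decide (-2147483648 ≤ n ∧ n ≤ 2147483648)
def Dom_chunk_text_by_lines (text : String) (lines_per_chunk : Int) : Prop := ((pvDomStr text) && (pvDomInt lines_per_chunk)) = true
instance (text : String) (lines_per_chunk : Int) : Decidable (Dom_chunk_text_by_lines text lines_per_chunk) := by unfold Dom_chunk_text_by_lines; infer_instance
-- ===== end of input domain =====

-- B replaces A's range/slice indexing by one streaming pass over the lines with a fill-and-flush
-- buffer (objective: alternative decomposition, same cost); equal output on every lines_per_chunk ≥ 1.

-- ===== PORT A =====
def chunk_text_by_lines (text : String) (lines_per_chunk : Int) : List String :=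
  let lines := (PySem.Str.split? text "\n").getD []   -- sep "\n" ≠ "": split? is always `some` here
  (PySem.List.pyRange 0 (lines.length : Int) lines_per_chunk).foldl
    (fun chunks i =>
      let chunk := PySem.Str.join "\n" (PySem.List.slice lines (some i) (some (i + lines_per_chunk)))
      if PySem.Str.strip chunk ≠ "" then chunks ++ [chunk] else chunks) []

-- ===== PORT B =====
def chunk_text_by_lines_alt (text : String) (lines_per_chunk : Int) : List String :=
  let st := ((PySem.Str.split? text "\n").getD []).foldl
    (fun (st : List String × List String) line =>
      let buf := st.2 ++ [line]
      if (buf.length : Int) ≥ lines_per_chunk then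
        let chunk := PySem.Str.join "\n" buf
        (if PySem.Str.strip chunk ≠ "" then st.1 ++ [chunk] else st.1, [])
      else (st.1, buf)) ([], [])
  if st.2 ≠ [] then
    let chunk := PySem.Str.join "\n" st.2
    if PySem.Str.strip chunk ≠ "" then st.1 ++ [chunk] else st.1
  else st.1

-- ===== PRECONDITION & SPEC =====
-- Pre_ restricts to the natural domain lines_per_chunk ≥ 1: for lines_per_chunk = 0 A raises
-- ValueError (range step 0), and for negative values A's empty result is an accident of
-- range() with a negative step, outside the function's natural domain.
def Pre_chunk_text_by_lines (text : String) (lines_per_chunk : Int) : Prop :=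
  1 ≤ lines_per_chunk
instance (text : String) (lines_per_chunk : Int) : Decidable (Pre_chunk_text_by_lines text lines_per_chunk) := by unfold Pre_chunk_text_by_lines; infer_instance

def pvWitness_chunk_text_by_lines : String × Int := ("a\nb\nc", 2)

def Spec_chunk_text_by_lines (text : String) (lines_per_chunk : Int) (out : List String) : Prop := out = chunk_text_by_lines_alt text lines_per_chunk
instance (text : String) (lines_per_chunk : Int) (out : List String) : Decidable (Spec_chunk_text_by_lines text lines_per_chunk out) := by unfold Spec_chunk_text_by_lines; infer_instance

-- ===== CLAIM (what is proved, stated in full; the proofs are below) =====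
def Claim_equal_chunk_text_by_lines : Prop := ∀ (text : String) (lines_per_chunk : Int), Dom_chunk_text_by_lines text lines_per_chunk → Pre_chunk_text_by_lines text lines_per_chunk → Spec_chunk_text_by_lines text lines_per_chunk (chunk_text_by_lines text lines_per_chunk)

-- ===== LEMMAS AND PROOFS =====

-- flush one buffer: its joined text, kept only if it strips to something non-empty
def pvFlush (buf : List String) : List String :=
  let c := PySem.Str.join "\n" buf
  if PySem.Str.strip c ≠ "" then [c] else []

-- the common specification: split into consecutive groups of n lines, flush each
def pvGroups (n : Nat) : List String → List String
  | [] => []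
  | x :: xs => pvFlush ((x :: xs).take n) ++ pvGroups n (xs.drop (n - 1))
termination_by l => l.length
decreasing_by simp

theorem pvFlush_nil : pvFlush [] = [] := by rfl

theorem pvFlush_append (a : List String) (buf : List String) :
    (if PySem.Str.strip (PySem.Str.join "\n" buf) ≠ "" then a ++ [PySem.Str.join "\n" buf] else a)
      = a ++ pvFlush buf := by
  unfold pvFlush
  split <;> simp_all

theorem pvGroups_nil (n : Nat) : pvGroups n [] = [] := by rw [pvGroups.eq_def]

theorem pvGroups_step (n : Nat) (hn : 1 ≤ n) (l : List String) (h : l ≠ []) :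
    pvGroups n l = pvFlush (l.take n) ++ pvGroups n (l.drop n) := by
  cases l with
  | nil => exact absurd rfl h
  | cons x xs =>
    obtain ⟨m, rfl⟩ : ∃ m, n = m + 1 := ⟨n - 1, by omega⟩
    rw [pvGroups.eq_def]
    simp [List.drop_succ_cons]

theorem pvGroups_small (n : Nat) (hn : 1 ≤ n) (buf : List String) (h : buf.length ≤ n) :
    pvGroups n buf = pvFlush buf := by
  cases hb : buf with
  | nil => rw [pvGroups_nil, pvFlush_nil]
  | cons x xs =>
    rw [← hb, pvGroups_step n hn buf (by rw [hb]; simp)]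
    rw [List.take_of_length_le h, List.drop_eq_nil_of_le h, pvGroups_nil, List.append_nil]

theorem pvGroups_full (n : Nat) (hn : 1 ≤ n) (buf xs : List String) (h : buf.length = n) :
    pvGroups n (buf ++ xs) = pvFlush buf ++ pvGroups n xs := by
  have hbne : buf ≠ [] := by intro hb; rw [hb] at h; simp at h; omega
  rw [pvGroups_step n hn (buf ++ xs) (by simp [hbne])]
  rw [List.take_left' h, List.drop_left' h]

-- range(a, b, s) for positive s: empty when b ≤ a
theorem pvRange_nil (a b s : Int) (hs : 0 < s) (hb : b ≤ a) :
    PySem.List.pyRange a b s = [] := by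
  rw [PySem.List.pyRange_of_pos _ _ hs]
  simp [show ¬ a < b by omega]

-- range(a, b, s) for positive s, a < b: head a, tail starts at a + s
theorem pvRange_cons (a b s : Int) (hs : 0 < s) (hab : a < b) :
    PySem.List.pyRange a b s = a :: PySem.List.pyRange (a + s) b s := by
  rw [PySem.List.pyRange_of_pos _ _ hs, PySem.List.pyRange_of_pos _ _ hs]
  have hq : (b - a + s - 1) / s = (b - a - 1) / s + 1 := by
    have h1 : b - a + s - 1 = (b - a - 1) + 1 * s := by ring
    rw [h1, Int.add_mul_ediv_right _ _ (by omega)]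
  have hqnn : 0 ≤ (b - a - 1) / s := Int.ediv_nonneg (by omega) (by omega)
  rw [if_pos hab, hq]
  have ht : ((b - a - 1) / s + 1).toNat = ((b - a - 1) / s).toNat + 1 := by omega
  rw [ht, List.range_succ_eq_map]
  by_cases hsb : a + s < b
  · rw [if_pos hsb]
    have h2 : (b - (a + s) + s - 1) / s = (b - a - 1) / s := by congr 1; ring
    rw [h2]
    simp only [List.map_cons, List.map_map]
    congr 1
    · simp
    · apply List.map_congr_left
      intro j _
      simp only [Function.comp_apply]
      push_cast
      ring
  · have h0 : (b - a - 1) / s = 0 := Int.ediv_eq_zero_of_lt (by omega) (by omega)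
    rw [if_neg hsb, h0]
    simp

-- A's indexed fold computes pvGroups (i = the current range index)
set_option maxHeartbeats 1600000 in
theorem pvLemA (k : Int) (hk : 1 ≤ k) (N : Nat) :
    ∀ (lines : List String) (i : Int), 0 ≤ i → lines.length - i.toNat ≤ N →
    ∀ (acc : List String),
    (PySem.List.pyRange i (lines.length : Int) k).foldl
      (fun chunks j =>
        let chunk := PySem.Str.join "\n" (PySem.List.slice lines (some j) (some (j + k)))
        if PySem.Str.strip chunk ≠ "" then chunks ++ [chunk] else chunks) acc
      = acc ++ pvGroups k.toNat (lines.drop i.toNat) := by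
  induction N with
  | zero =>
    intro lines i hi hN acc
    have hge : (lines.length : Int) ≤ i := by omega
    rw [pvRange_nil _ _ _ (by omega) hge, List.foldl_nil,
        List.drop_eq_nil_of_le (by omega), pvGroups_nil, List.append_nil]
  | succ N ih =>
    intro lines i hi hN acc
    by_cases hge : (lines.length : Int) ≤ i
    · rw [pvRange_nil _ _ _ (by omega) hge, List.foldl_nil,
          List.drop_eq_nil_of_le (by omega), pvGroups_nil, List.append_nil]
    · rw [pvRange_cons _ _ _ (by omega) (by omega), List.foldl_cons]
      have hfirst :
          (let chunk := PySem.Str.join "\n" (PySem.List.slice lines (some i) (some (i + k)))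
           if PySem.Str.strip chunk ≠ "" then acc ++ [chunk] else acc)
            = acc ++ pvFlush ((lines.drop i.toNat).take k.toNat) := by
        rw [show PySem.List.slice lines (some i) (some (i + k))
              = (lines.drop i.toNat).take k.toNat by
          rw [PySem.List.slice_toNat lines hi (by omega)]
          congr 1
          omega]
        exact pvFlush_append acc _
      rw [hfirst]
      rw [ih lines (i + k) (by omega) (by omega) (acc ++ pvFlush ((lines.drop i.toNat).take k.toNat))]
      have hne : lines.drop i.toNat ≠ [] := by
        intro hnil
        have hlen := congrArg List.length hnil
        simp only [List.length_drop, List.length_nil] at hlen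
        omega
      rw [pvGroups_step k.toNat (by omega) (lines.drop i.toNat) hne, List.append_assoc,
          List.drop_drop, show (i + k).toNat = i.toNat + k.toNat by omega]

-- B's buffer fold computes pvGroups
set_option maxHeartbeats 1600000 in
theorem pvLemB (k : Int) (hk : 1 ≤ k) :
    ∀ (lines buf acc : List String), buf.length < k.toNat →
    (let st := lines.foldl
        (fun (st : List String × List String) line =>
          let b := st.2 ++ [line]
          if (b.length : Int) ≥ k then
            let chunk := PySem.Str.join "\n" b
            (if PySem.Str.strip chunk ≠ "" then st.1 ++ [chunk] else st.1, [])
          else (st.1, b)) (acc, buf)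
     if st.2 ≠ [] then
       let chunk := PySem.Str.join "\n" st.2
       if PySem.Str.strip chunk ≠ "" then st.1 ++ [chunk] else st.1
     else st.1)
      = acc ++ pvGroups k.toNat (buf ++ lines) := by
  intro lines
  induction lines with
  | nil =>
    intro buf acc hbuf
    simp only [List.foldl_nil, List.append_nil]
    rw [pvGroups_small k.toNat (by omega) buf (by omega)]
    by_cases hb : buf = []
    · subst hb; simp [pvFlush_nil]
    · rw [if_pos hb]
      exact pvFlush_append acc buf
  | cons x xs ih =>
    intro buf acc hbuf
    simp only [List.foldl_cons]
    by_cases hfull : ((buf ++ [x]).length : Int) ≥ k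
    · have hlen : (buf ++ [x]).length = k.toNat := by
        simp only [List.length_append, List.length_cons, List.length_nil] at hfull ⊢
        omega
      rw [if_pos hfull]
      have hrec := ih [] (if PySem.Str.strip (PySem.Str.join "\n" (buf ++ [x])) ≠ ""
          then acc ++ [PySem.Str.join "\n" (buf ++ [x])] else acc) (by simp; omega)
      simp only [List.nil_append] at hrec
      rw [hrec, pvFlush_append acc (buf ++ [x])]
      rw [show buf ++ x :: xs = (buf ++ [x]) ++ xs by simp]
      rw [pvGroups_full k.toNat (by omega) (buf ++ [x]) xs hlen]
      simp
    · rw [if_neg hfull]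
      have hlt : (buf ++ [x]).length < k.toNat := by
        simp only [List.length_append, List.length_cons, List.length_nil] at hfull ⊢
        omega
      rw [ih (buf ++ [x]) acc hlt]
      rw [show (buf ++ [x]) ++ xs = buf ++ x :: xs by simp]

-- ===== VERDICT (by name: the statement is the Claim_ definition above) =====
set_option maxHeartbeats 1600000 in
theorem chunk_text_by_lines_spec : Claim_equal_chunk_text_by_lines := by
  intro text k _ hpre
  have hk : 1 ≤ k := hpre
  unfold Spec_chunk_text_by_lines chunk_text_by_lines chunk_text_by_lines_alt
  set lines := (PySem.Str.split? text "\n").getD [] with hlines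
  rw [pvLemA k hk lines.length lines 0 (by omega) (by omega) []]
  simp only [Int.toNat_zero, List.drop_zero, List.nil_append]
  have hB := pvLemB k hk lines [] []
  simp only [List.nil_append] at hB
  rw [hB (by simp; omega)]
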